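-- pv_equiv track=rewrite | github.com/thecloudcode/WorkHarder | KickStart 2023/5.py | find_num_rows
-- ===== SOURCE A (Python) =====
-- def find_num_rows(n):
--     end = 10 ** 7
--     start = 0
--     while end - start > 1-1+1:
--         m = (end + start) // 2
--         v = m * (m + 1) * 13
--         if v >= n:
--             end = m
--         else:
--             start = m
--     return start+1-1
-- ===== SOURCE B (Python) =====
-- def find_num_rows(n):
--     if n <= 0:
--         return 0
--     # largest m with 13*m*(m+1) < n, via integer sqrt of the discriminant
--     D = 52 * n + 169
--     # Newton's method integer square root
--     x, y = D, (D + 1) // 2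
--     while y < x:
--         x, y = y, (y + D // y) // 2
--     m = (x - 13) // 26
--     if 13 * m * (m + 1) >= n:
--         m -= 1
--     return m
-- ===== Notes on version B (the rewrite author's own statement) =====
-- stated objective: alternative
-- what changed: Replaces A's binary search over a fixed range by a closed-form inverse: a Newton integer square root of the quadratic's discriminant yields the candidate row count directly, corrected by a single boundary check.
import Mathlib
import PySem

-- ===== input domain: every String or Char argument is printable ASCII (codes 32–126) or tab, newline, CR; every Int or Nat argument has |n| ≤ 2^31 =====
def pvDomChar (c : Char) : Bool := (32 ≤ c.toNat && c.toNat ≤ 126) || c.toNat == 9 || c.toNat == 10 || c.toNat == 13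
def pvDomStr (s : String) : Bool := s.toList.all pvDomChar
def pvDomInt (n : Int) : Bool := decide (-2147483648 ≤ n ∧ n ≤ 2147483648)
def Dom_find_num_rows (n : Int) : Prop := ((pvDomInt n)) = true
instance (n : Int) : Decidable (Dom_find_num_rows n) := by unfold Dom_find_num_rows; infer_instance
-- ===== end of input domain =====

-- B replaces A's binary search by a closed-form inverse (Newton integer square root of the
-- discriminant plus one boundary correction); equal return values on Dom, objective: alternative.

-- ===== PORT A =====
-- the while loop: state (start, e); while e - start > 1
def findA_loop (n start e : Int) : Int :=
  if e - start > 1 then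
    let m := PySem.Int.floordiv (e + start) 2
    let v := m * (m + 1) * 13
    if v ≥ n then findA_loop n start m else findA_loop n m e
  else start
termination_by (e - start).toNat
decreasing_by
  · have h2 := (PySem.Int.floordiv_eq_iff_of_pos (a := e + start) (b := 2)
      (q := PySem.Int.floordiv (e + start) 2) (by omega)).mp rfl
    omega
  · have h2 := (PySem.Int.floordiv_eq_iff_of_pos (a := e + start) (b := 2)
      (q := PySem.Int.floordiv (e + start) 2) (by omega)).mp rfl
    omega

def find_num_rows (n : Int) : Int :=
  findA_loop n 0 (10 ^ 7) + 1 - 1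

-- ===== PORT B =====
-- Newton's integer-square-root loop of Source B (runs on nonnegative values, so over Nat)
def newtonLoop (D x y : Nat) : Nat :=
  if y < x then newtonLoop D y ((y + D / y) / 2) else x
termination_by x

def find_num_rows_alt (n : Int) : Int :=
  if n ≤ 0 then 0
  else
    let D : Nat := (52 * n + 169).toNat
    let s : Int := (newtonLoop D D ((D + 1) / 2) : Nat)
    let m := PySem.Int.floordiv (s - 13) 26
    if 13 * m * (m + 1) ≥ n then m - 1 else m

-- ===== PRECONDITION & SPEC =====
def Spec_find_num_rows (n : Int) (out : Int) : Prop := out = find_num_rows_alt n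
instance (n : Int) (out : Int) : Decidable (Spec_find_num_rows n out) := by unfold Spec_find_num_rows; infer_instance

-- ===== CLAIM (what is proved, stated in full; the proofs are below) =====
def Claim_equal_find_num_rows : Prop := ∀ (n : Int), Dom_find_num_rows n → Spec_find_num_rows n (find_num_rows n)

-- ===== LEMMAS AND PROOFS =====

-- characterization: for 1 ≤ n, r is THE answer
def Good (n r : Int) : Prop := 0 ≤ r ∧ 13 * r * (r + 1) < n ∧ n ≤ 13 * (r + 1) * (r + 2)

theorem good_unique {n r1 r2 : Int} (h1 : Good n r1) (h2 : Good n r2) : r1 = r2 := by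
  obtain ⟨a1, b1, c1⟩ := h1
  obtain ⟨a2, b2, c2⟩ := h2
  by_contra hne
  rcases lt_or_gt_of_ne hne with h | h
  · nlinarith
  · nlinarith

-- Newton step never goes below the integer square root
theorem newton_step_ge (D y : Nat) (hy : 1 ≤ y) : Nat.sqrt D ≤ (y + D / y) / 2 := by
  suffices key : 2 * Nat.sqrt D ≤ y + D / y by omega
  by_contra hcon
  have hcon' : (y : Int) + ((D / y : Nat) : Int) ≤ 2 * ((Nat.sqrt D : Nat) : Int) - 1 := by omega
  have e1 : (y : Int) * ((D / y : Nat) : Int) + ((D % y : Nat) : Int) = (D : Int) := by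
    exact_mod_cast Nat.div_add_mod D y
  have e2 : ((D % y : Nat) : Int) < (y : Int) := by exact_mod_cast Nat.mod_lt _ (by omega)
  have e3 : (0 : Int) ≤ ((D % y : Nat) : Int) := by positivity
  have e4 : ((Nat.sqrt D : Nat) : Int) * ((Nat.sqrt D : Nat) : Int) ≤ (D : Int) := by
    exact_mod_cast Nat.sqrt_le D
  have e5 : (1 : Int) ≤ (y : Int) := by exact_mod_cast hy
  have hmul := mul_le_mul_of_nonneg_left hcon' (by omega : (0 : Int) ≤ (y : Int))
  nlinarith [sq_nonneg ((y : Int) - ((Nat.sqrt D : Nat) : Int))]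

-- Newton step strictly decreases while above the root
theorem newton_step_lt (D y : Nat) (h : D < y * y) : (y + D / y) / 2 < y := by
  have : D / y < y := Nat.div_lt_of_lt_mul (by omega)
  omega

theorem newtonLoop_eq_sqrt (D : Nat) (hD : 1 ≤ D) :
    ∀ x y : Nat, 1 ≤ x → Nat.sqrt D ≤ x → y = (x + D / x) / 2 → newtonLoop D x y = Nat.sqrt D := by
  intro x
  induction x using Nat.strong_induction_on with
  | _ x ih =>
    intro y hx hsx hy
    rw [newtonLoop]
    split
    · rename_i hlt
      have hs1 : 1 ≤ Nat.sqrt D := by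
        have := Nat.sqrt_le D
        rcases Nat.eq_zero_or_pos (Nat.sqrt D) with h0 | h0
        · exfalso
          have : D = 0 := by
            have := Nat.lt_succ_sqrt D
            simp [h0] at this
            omega
          omega
        · omega
      have hy1 : Nat.sqrt D ≤ y := hy ▸ newton_step_ge D x hx
      exact ih y hlt _ (by omega) hy1 rfl
    · rename_i hnlt
      push_neg at hnlt
      by_contra hne
      have hgt : Nat.sqrt D < x := lt_of_le_of_ne hsx (Ne.symm hne)
      have hDlt : D < x * x := by
        have h := Nat.sqrt_lt'.mp hgt
        nlinarith
      have := newton_step_lt D x hDlt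
      omega

-- the Newton call inside B computes the integer square root
theorem newton_call (D : Nat) (hD : 1 ≤ D) : newtonLoop D D ((D + 1) / 2) = Nat.sqrt D := by
  apply newtonLoop_eq_sqrt D hD D ((D + 1) / 2) (by omega) (Nat.sqrt_le_self D)
  have : D / D = 1 := Nat.div_self (by omega)
  omega

-- B's result satisfies Good for 1 ≤ n
theorem alt_good (n : Int) (hn : 1 ≤ n) : Good n (find_num_rows_alt n) := by
  have hnn : ¬ n ≤ 0 := by omega
  simp only [find_num_rows_alt, if_neg hnn]
  set D : Nat := (52 * n + 169).toNat with hDdef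
  have hDval : (D : Int) = 52 * n + 169 := by rw [hDdef]; omega
  have hD1 : 1 ≤ D := by omega
  rw [newton_call D hD1]
  set s : Nat := Nat.sqrt D with hs
  have hsle : (s : Int) * s ≤ 52 * n + 169 := by
    have := Nat.sqrt_le D
    rw [← hDval]; exact_mod_cast this
  have hslt : 52 * n + 169 < ((s : Int) + 1) * (s + 1) := by
    have := Nat.lt_succ_sqrt D
    rw [← hDval]; exact_mod_cast this
  have hs14 : 14 ≤ (s : Int) := by
    by_contra hcon
    push_neg at hcon
    have h0 : (0 : Int) ≤ (s : Int) := by positivity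
    nlinarith
  have hfd : PySem.Int.floordiv ((s : Int) - 13) 26 = ((s : Int) - 13) / 26 :=
    PySem.Int.floordiv_eq_ediv_of_pos (by omega)
  rw [hfd]
  set m : Int := ((s : Int) - 13) / 26 with hm
  have hmb := Int.ediv_add_emod ((s : Int) - 13) 26
  have hmod1 : 0 ≤ ((s : Int) - 13) % 26 := Int.emod_nonneg _ (by omega)
  have hmod2 : ((s : Int) - 13) % 26 < 26 := Int.emod_lt_of_pos _ (by omega)
  have hlo : 26 * m + 13 ≤ (s : Int) := by omega
  have hhi : (s : Int) ≤ 26 * m + 38 := by omega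
  have hm0 : 0 ≤ m := by omega
  have hup : 13 * m * (m + 1) ≤ n := by nlinarith
  have hdn : n ≤ 13 * (m + 1) * (m + 2) := by nlinarith
  split
  · rename_i hge
    have heq : 13 * m * (m + 1) = n := le_antisymm hup hge
    have hm1 : 1 ≤ m := by nlinarith
    refine ⟨by omega, by nlinarith, by nlinarith⟩
  · rename_i hlt
    push_neg at hlt
    exact ⟨hm0, hlt, hdn⟩

-- A's binary-search loop invariant
theorem loopA_inv (n : Int) : ∀ start e : Int, start < e →
    (start = 0 ∨ 13 * start * (start + 1) < n) →
    (e = 10000000 ∨ n ≤ 13 * e * (e + 1)) →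
    (findA_loop n start e = 0 ∨ 13 * findA_loop n start e * (findA_loop n start e + 1) < n) ∧
    (findA_loop n start e + 1 = 10000000 ∨
      n ≤ 13 * (findA_loop n start e + 1) * (findA_loop n start e + 2)) ∧
    start ≤ findA_loop n start e := by
  intro start e
  fun_induction findA_loop n start e with
  | case1 start e hc m v hv ih =>
    intro hlt hstart he
    have hmb := (PySem.Int.floordiv_eq_iff_of_pos (a := e + start) (b := 2)
      (q := m) (by omega)).mp rfl
    exact ih (by omega) hstart (Or.inr (by nlinarith))
  | case2 start e hc m v hv ih =>
    intro hlt hstart he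
    have hmb := (PySem.Int.floordiv_eq_iff_of_pos (a := e + start) (b := 2)
      (q := m) (by omega)).mp rfl
    push_neg at hv
    have hres := ih (by omega) (Or.inr (by nlinarith)) he
    exact ⟨hres.1, hres.2.1, by omega⟩
  | case3 start e hc =>
    intro hlt hstart he
    have he1 : e = start + 1 := by omega
    subst he1
    refine ⟨hstart, ?_, le_refl _⟩
    rcases he with h | h
    · exact Or.inl (by omega)
    · exact Or.inr (by nlinarith)

-- when n ≤ 0, A's loop from start = 0 returns 0
theorem loopA_nonpos (n : Int) (hn : n ≤ 0) :
    ∀ k : Nat, ∀ e : Int, 0 < e → e.toNat ≤ k → findA_loop n 0 e = 0 := by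
  intro k
  induction k with
  | zero => intro e he hk; omega
  | succ k ih =>
    intro e he hk
    rw [findA_loop]
    split
    · rename_i hcond
      have hmb := (PySem.Int.floordiv_eq_iff_of_pos (a := e + 0) (b := 2)
        (q := PySem.Int.floordiv (e + 0) 2) (by omega)).mp rfl
      set m := PySem.Int.floordiv (e + 0) 2 with hmdef
      have hm1 : 1 ≤ m := by omega
      rw [if_pos (by nlinarith : m * (m + 1) * 13 ≥ n)]
      exact ih m (by omega) (by omega)
    · rfl

-- ===== VERDICT (by name: the statement is the Claim_ definition above) =====
theorem find_num_rows_spec : Claim_equal_find_num_rows := by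
  intro n hdom
  unfold Spec_find_num_rows find_num_rows
  have hdom' : -2147483648 ≤ n ∧ n ≤ 2147483648 := by
    simpa [Dom_find_num_rows, pvDomInt] using hdom
  by_cases hn : n ≤ 0
  · have hA : findA_loop n 0 (10 ^ 7) = 0 :=
      loopA_nonpos n (by omega) ((10 : Int) ^ 7).toNat (10 ^ 7) (by norm_num) (by norm_num)
    rw [hA]
    unfold find_num_rows_alt
    rw [if_pos (by omega)]
    norm_num
  · push_neg at hn
    have hn1 : 1 ≤ n := by omega
    have hinv := loopA_inv n 0 (10 ^ 7) (by norm_num) (Or.inl rfl) (by norm_num)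
    set r := findA_loop n 0 (10 ^ 7) with hr
    have hGoodA : Good n r := by
      refine ⟨?_, ?_, ?_⟩
      · exact hinv.2.2
      · rcases hinv.1 with h | h
        · rw [h]; omega
        · exact h
      · rcases hinv.2.1 with h | h
        · exfalso
          have hr9 : r = 9999999 := by omega
          rcases hinv.1 with h1 | h1
          · omega
          · rw [hr9] at h1; nlinarith
        · exact h
    have := good_unique hGoodA (alt_good n hn1)
    omega
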